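-- pv_equiv track=rewrite | github.com/ebenshiling/ApplyPilot | src/applypilot/scoring/tailor_strategy.py | build_summary_gap_guidance
-- ===== SOURCE A (Python) =====
-- from typing import Any
--
-- def build_summary_gap_guidance(requirement_gaps: dict[str, Any]) -> str:
--     """Return prompt guidance so the summary stays strong without overclaiming."""
--     gaps = requirement_gaps if isinstance(requirement_gaps, dict) else {}
--     missing_must = [str(x) for x in (gaps.get("missing_must_have_skills") or []) if str(x).strip()]
--     missing_hard = [str(x) for x in (gaps.get("missing_hard_requirements") or []) if str(x).strip()]
--     missing_domains = [str(x) for x in (gaps.get("missing_domains") or []) if str(x).strip()]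
--
--     if not (missing_must or missing_hard or missing_domains):
--         return (
--             "Summary should lead with the strongest direct match areas and sound confident, "
--             "but remain grounded in evidence."
--         )
--
--     notes: list[str] = [
--         "Summary must stay strong on overlapping experience but avoid implying missing credentials or domain experience.",
--         "Do not present gaps as if they are already satisfied.",
--     ]
--     if missing_hard:
--         notes.append("Missing hard requirements: " + ", ".join(missing_hard[:4]))
--     if missing_must:
--         notes.append("Missing must-have skills: " + ", ".join(missing_must[:5]))
--     if missing_domains:
--         notes.append("Missing domain context: " + ", ".join(missing_domains[:3]))
--     notes.append("Use adjacent strengths, transferable support, and evidence-backed responsibilities instead.")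
--     return " ".join(notes)
-- ===== SOURCE B (Python) =====
-- _DEFAULT = (
--     "Summary should lead with the strongest direct match areas and sound confident, "
--     "but remain grounded in evidence."
-- )
-- _PREFIX = (
--     "Summary must stay strong on overlapping experience but avoid implying missing "
--     "credentials or domain experience. Do not present gaps as if they are already satisfied. "
-- )
-- _TAIL = "Use adjacent strengths, transferable support, and evidence-backed responsibilities instead."
--
--
-- def build_summary_gap_guidance(requirement_gaps):
--     """Recursive back-to-front build: one recursion over the categories constructs
--     the guidance tail by direct string concatenation and reports whether any
--     category fired; no intermediate notes list, no join."""
--     gaps = requirement_gaps if isinstance(requirement_gaps, dict) else {}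
--
--     def go(spec):
--         # (text from this category to the end of the message, any category fired)
--         if not spec:
--             return _TAIL, False
--         key, label, limit = spec[0]
--         tail, fired = go(spec[1:])
--         items = [s for s in (str(x) for x in (gaps.get(key) or [])) if s.strip()]
--         if not items:
--             return tail, fired
--         return label + " " + ", ".join(items[:limit]) + " " + tail, True
--
--     body, fired = go([
--         ("missing_hard_requirements", "Missing hard requirements:", 4),
--         ("missing_must_have_skills", "Missing must-have skills:", 5),
--         ("missing_domains", "Missing domain context:", 3),
--     ])
--     return _PREFIX + body if fired else _DEFAULT
-- ===== Notes on version B (the rewrite author's own statement) =====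
-- stated objective: alternative
-- what changed: Replaces the staged list-of-notes build plus ' '.join with a single recursive pass over the categories that constructs the message tail back-to-front by direct string concatenation and reports via a flag whether any category fired.
import Mathlib
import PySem

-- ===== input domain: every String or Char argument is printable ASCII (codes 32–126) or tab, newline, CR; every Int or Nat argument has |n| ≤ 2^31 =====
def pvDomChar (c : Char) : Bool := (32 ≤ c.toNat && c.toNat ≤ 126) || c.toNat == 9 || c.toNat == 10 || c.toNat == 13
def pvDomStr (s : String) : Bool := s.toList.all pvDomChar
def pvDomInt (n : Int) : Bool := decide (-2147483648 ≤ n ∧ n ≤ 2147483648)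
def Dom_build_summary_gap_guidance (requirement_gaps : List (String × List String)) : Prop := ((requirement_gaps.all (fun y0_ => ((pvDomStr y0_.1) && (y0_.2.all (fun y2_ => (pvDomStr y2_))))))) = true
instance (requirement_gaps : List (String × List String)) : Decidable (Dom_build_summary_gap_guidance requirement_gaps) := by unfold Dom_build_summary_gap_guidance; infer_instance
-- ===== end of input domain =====

-- B rebuilds the guidance recursively back-to-front by direct concatenation (no notes list, no join): alternative decomposition, same cost.


-- ===== PORT A =====
-- literal transliteration of A: three separately cleaned lists, empty test, three unrolled append blocks, " ".join
def build_summary_gap_guidance (requirement_gaps : List (String × List String)) : String :=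
  let gaps := PySem.Dict.mk requirement_gaps
  let missing_must := ((gaps.get? "missing_must_have_skills").getD []).filter
      (fun x => PySem.Str.strip x != "")
  let missing_hard := ((gaps.get? "missing_hard_requirements").getD []).filter
      (fun x => PySem.Str.strip x != "")
  let missing_domains := ((gaps.get? "missing_domains").getD []).filter
      (fun x => PySem.Str.strip x != "")
  if missing_must.isEmpty && missing_hard.isEmpty && missing_domains.isEmpty then
    "Summary should lead with the strongest direct match areas and sound confident, but remain grounded in evidence."
  else
    let notes : List String :=
      ["Summary must stay strong on overlapping experience but avoid implying missing credentials or domain experience.",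
       "Do not present gaps as if they are already satisfied."]
    let notes := if !missing_hard.isEmpty then
        notes ++ ["Missing hard requirements: " ++ PySem.Str.join ", " (PySem.List.slice missing_hard none (some 4))]
      else notes
    let notes := if !missing_must.isEmpty then
        notes ++ ["Missing must-have skills: " ++ PySem.Str.join ", " (PySem.List.slice missing_must none (some 5))]
      else notes
    let notes := if !missing_domains.isEmpty then
        notes ++ ["Missing domain context: " ++ PySem.Str.join ", " (PySem.List.slice missing_domains none (some 3))]
      else notes
    let notes := notes ++ ["Use adjacent strengths, transferable support, and evidence-backed responsibilities instead."]
    PySem.Str.join " " notes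

-- ===== PORT B =====
-- B-side helper: the recursive back-to-front builder go(spec) -> (text from here to the end, any category fired)
def pvGoGuidance (gaps : PySem.Dict String (List String)) : List (String × String × Int) → String × Bool
  | [] => ("Use adjacent strengths, transferable support, and evidence-backed responsibilities instead.", false)
  | (key, label, limit) :: rest =>
    let tf := pvGoGuidance gaps rest
    let items := ((gaps.get? key).getD []).filter (fun s => PySem.Str.strip s != "")
    if items.isEmpty then tf
    else (label ++ " " ++ PySem.Str.join ", " (PySem.List.slice items none (some limit)) ++ " " ++ tf.1, true)

-- literal transliteration of B: one recursion over the categories, direct concatenation, default if nothing fired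
def build_summary_gap_guidance_alt (requirement_gaps : List (String × List String)) : String :=
  let gaps := PySem.Dict.mk requirement_gaps
  let bf := pvGoGuidance gaps
    [("missing_hard_requirements", "Missing hard requirements:", 4),
     ("missing_must_have_skills", "Missing must-have skills:", 5),
     ("missing_domains", "Missing domain context:", 3)]
  if bf.2 then
    "Summary must stay strong on overlapping experience but avoid implying missing credentials or domain experience. Do not present gaps as if they are already satisfied. " ++ bf.1
  else
    "Summary should lead with the strongest direct match areas and sound confident, but remain grounded in evidence."

-- ===== PRECONDITION & SPEC =====
def Spec_build_summary_gap_guidance (requirement_gaps : List (String × List String)) (out : String) : Prop := out = build_summary_gap_guidance_alt requirement_gaps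
instance (requirement_gaps : List (String × List String)) (out : String) : Decidable (Spec_build_summary_gap_guidance requirement_gaps out) := by unfold Spec_build_summary_gap_guidance; infer_instance

-- ===== CLAIM (what is proved, stated in full; the proofs are below) =====
def Claim_equal_build_summary_gap_guidance : Prop := ∀ (requirement_gaps : List (String × List String)), Dom_build_summary_gap_guidance requirement_gaps → Spec_build_summary_gap_guidance requirement_gaps (build_summary_gap_guidance requirement_gaps)

-- ===== LEMMAS AND PROOFS =====
theorem pv_join_space_cons (a b : String) (l : List String) :
    PySem.Str.join " " (a :: b :: l) = a ++ " " ++ PySem.Str.join " " (b :: l) := by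
  apply String.toList_injective
  simp [PySem.Chars.join_cons_cons]

theorem pv_join_space_singleton (a : String) : PySem.Str.join " " [a] = a := by
  apply String.toList_injective
  simp [PySem.Chars.join_singleton]

theorem pv_prefix_merge (x : String) :
    "Summary must stay strong on overlapping experience but avoid implying missing credentials or domain experience. " ++
      ("Do not present gaps as if they are already satisfied. " ++ x) =
    "Summary must stay strong on overlapping experience but avoid implying missing credentials or domain experience. Do not present gaps as if they are already satisfied. " ++ x := by
  apply String.toList_injective
  simp

-- ===== VERDICT (by name: the statement is the Claim_ definition above) =====
theorem build_summary_gap_guidance_spec : Claim_equal_build_summary_gap_guidance := by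
  intro rg _
  unfold Spec_build_summary_gap_guidance build_summary_gap_guidance build_summary_gap_guidance_alt
  simp only [pvGoGuidance]
  split_ifs <;>
    simp_all [pv_join_space_cons, pv_join_space_singleton, String.append_assoc, pv_prefix_merge]
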